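-- pv_equiv track=rewrite | github.com/cmungall/ai-gene-review | src/ai_gene_review/validation/supporting_text_validator.py | preprocess_uniprot_content
-- ===== SOURCE A (Python) =====
-- def preprocess_uniprot_content(content: str) -> str:
--     """Preprocess UniProt file content to remove line prefixes and join continuation lines.
--
--     UniProt files have specific line prefixes (like CC, FT, DE) that should be removed
--     for text matching. Also handles continuation lines that are split across multiple lines.
--
--     Args:
--         content: Raw UniProt file content
--
--     Returns:
--         Preprocessed content with line prefixes removed
--
--     Examples:
--         >>> validator = SupportingTextValidator()
--         >>> uniprot = '''CC   -!- FUNCTION: Part of an ABC transporter.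
--         ... CC       More text here.
--         ... FT   DOMAIN          14..251
--         ... FT                   /note="ABC transporter 1"'''
--         >>> processed = validator.preprocess_uniprot_content(uniprot)
--         >>> "FUNCTION: Part of an ABC transporter. More text here" in processed
--         True
--         >>> 'DOMAIN          14..251 /note="ABC transporter 1"' in processed
--         True
--     """
--     lines = content.split('\n')
--     processed_lines = []
--     current_section = None
--     current_text = []
--
--     for line in lines:
--         if not line.strip():
--             continue
--
--         # Check if line starts with a two-letter code
--         if len(line) >= 2 and line[:2].isupper() and (len(line) < 3 or line[2] == ' '):
--             prefix = line[:2]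
--             rest = line[5:] if len(line) > 5 else ""  # Skip prefix and spaces
--
--             # If we're switching sections, save the previous one
--             if current_section and current_section != prefix:
--                 if current_text:
--                     processed_lines.append(' '.join(current_text))
--                 current_text = []
--
--             current_section = prefix
--             if rest.strip():
--                 # Handle FT lines specially to preserve structure
--                 if prefix == 'FT':
--                     # Remove extra spaces but keep the structure
--                     rest = rest.strip()
--                     if rest and not rest.startswith('/'):
--                         # This is a feature location line
--                         current_text.append(rest)
--                     elif rest.startswith('/'):
--                         # This is a qualifier line, append to previous
--                         if current_text:
--                             current_text[-1] = current_text[-1] + ' ' + rest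
--                         else:
--                             current_text.append(rest)
--                 else:
--                     current_text.append(rest.strip())
--         elif current_section:
--             # Continuation line without prefix
--             continuation = line.strip()
--             if continuation:
--                 if current_section == 'FT' and continuation.startswith('/'):
--                     # FT qualifier continuation
--                     if current_text:
--                         current_text[-1] = current_text[-1] + ' ' + continuation
--                     else:
--                         current_text.append(continuation)
--                 else:
--                     current_text.append(continuation)
--
--     # Don't forget the last section
--     if current_text:
--         processed_lines.append(' '.join(current_text))
--
--     # Join all processed lines with newlines to maintain some structure
--     return '\n'.join(processed_lines)
-- ===== SOURCE B (Python) =====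
-- from itertools import groupby
--
--
-- def preprocess_uniprot_content(content: str) -> str:
--     """Label each line with its effective section, group consecutive equal
--     sections, and render each group as one space-joined line."""
--     labeled = []
--     section = None
--     for line in content.split('\n'):
--         if not line.strip():
--             continue
--         if len(line) >= 2 and line[:2].isupper() and (len(line) < 3 or line[2] == ' '):
--             section = line[:2]
--             labeled.append((section, line[5:].strip()))
--         elif section is not None:
--             labeled.append((section, line.strip()))
--     out = []
--     for sec, grp in groupby(labeled, key=lambda p: p[0]):
--         tokens = []
--         for _, text in grp:
--             if not text:
--                 continue
--             if sec == 'FT' and text.startswith('/') and tokens: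
--                 tokens[-1] = tokens[-1] + ' ' + text
--             else:
--                 tokens.append(text)
--         if tokens:
--             out.append(' '.join(tokens))
--     return '\n'.join(out)
-- ===== Notes on version B (the rewrite author's own statement) =====
-- stated objective: alternative
-- what changed: A's single stateful loop (mutable current_section/current_text with flush-on-section-switch and a trailing final flush) is replaced by a three-phase pipeline: label every non-blank line with its effective section, group consecutive equal sections with itertools.groupby, and render each group's token list independently.
import Mathlib
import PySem

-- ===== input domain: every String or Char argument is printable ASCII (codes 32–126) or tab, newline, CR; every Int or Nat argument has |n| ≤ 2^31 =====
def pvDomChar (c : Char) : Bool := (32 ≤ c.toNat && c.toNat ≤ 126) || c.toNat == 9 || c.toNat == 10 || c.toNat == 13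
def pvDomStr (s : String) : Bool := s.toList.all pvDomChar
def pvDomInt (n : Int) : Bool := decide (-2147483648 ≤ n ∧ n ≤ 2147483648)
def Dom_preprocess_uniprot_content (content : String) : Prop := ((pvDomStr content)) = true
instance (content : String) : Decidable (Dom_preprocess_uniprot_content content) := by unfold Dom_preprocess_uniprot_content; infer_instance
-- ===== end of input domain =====

-- B restructures A's single stateful loop into label → group-consecutive → render phases (objective: alternative decomposition, same cost).

-- ===== PORT A =====

-- hand port of Python str.isupper() (at least one cased char, no lowercase char); exact on the ASCII domain
def pvA_strIsupper (s : String) : Bool :=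
  s.toList.any PySem.Chars.isalpha && s.toList.all (fun c => !PySem.Chars.islower c)

-- 'len(line) >= 2 and line[:2].isupper() and (len(line) < 3 or line[2] == " ")'
def pvA_isPref (line : String) : Bool :=
  decide (2 ≤ PySem.Str.len line) && pvA_strIsupper (PySem.Str.slice line none (some 2)) &&
    (decide (PySem.Str.len line < 3) || (PySem.Str.pyGet? line 2 == some ' '))

-- 'current_text[-1] = current_text[-1] + " " + t' with A's empty-list fallback 'current_text.append(t)'
def pvA_merge : List String → String → List String
  | [], t => [t]
  | [x], t => [x ++ " " ++ t]
  | x :: xs, t => x :: pvA_merge xs t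

-- one iteration of A's 'for line in lines' over state (processed_lines, current_section, current_text)
def pvA_step (st : List String × Option String × List String) (line : String) :
    List String × Option String × List String :=
  let pl := st.1; let cs := st.2.1; let ct := st.2.2
  if PySem.Str.strip line = "" then st
  else if pvA_isPref line then
    let pfx := PySem.Str.slice line none (some 2)
    let rest := if 5 < PySem.Str.len line then PySem.Str.slice line (some 5) none else ""
    let pair :=
      match cs with
      | some s =>
        if s ≠ pfx then ((if ct ≠ [] then pl ++ [PySem.Str.join " " ct] else pl), ([] : List String))
        else (pl, ct)
      | none => (pl, ct)
    let pl := pair.1; let ct := pair.2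
    if PySem.Str.strip rest ≠ "" then
      if pfx = "FT" then
        let r := PySem.Str.strip rest
        if PySem.Str.startswith r "/" = false then (pl, some pfx, ct ++ [r])
        else (pl, some pfx, pvA_merge ct r)
      else (pl, some pfx, ct ++ [PySem.Str.strip rest])
    else (pl, some pfx, ct)
  else
    match cs with
    | none => st
    | some s =>
      let cont := PySem.Str.strip line
      if cont ≠ "" then
        if s = "FT" ∧ PySem.Str.startswith cont "/" = true then (pl, cs, pvA_merge ct cont)
        else (pl, cs, ct ++ [cont])
      else st

def preprocess_uniprot_content (content : String) : String :=
  let lines := (PySem.Str.split? content "\n").getD []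
  let st := lines.foldl pvA_step ([], none, [])
  let pl := if st.2.2 ≠ [] then st.1 ++ [PySem.Str.join " " st.2.2] else st.1
  PySem.Str.join "\n" pl

-- ===== PORT B =====

-- hand port of Python str.isupper(); exact on the ASCII domain
def pvB_strIsupper (s : String) : Bool :=
  s.toList.any PySem.Chars.isalpha && s.toList.all (fun c => !PySem.Chars.islower c)

def pvB_isPref (line : String) : Bool :=
  decide (2 ≤ PySem.Str.len line) && pvB_strIsupper (PySem.Str.slice line none (some 2)) &&
    (decide (PySem.Str.len line < 3) || (PySem.Str.pyGet? line 2 == some ' '))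

-- phase 1: label each non-blank line with its effective section
def pvB_label : Option String → List String → List (String × String)
  | _, [] => []
  | sec, line :: rest =>
    if PySem.Str.strip line = "" then pvB_label sec rest
    else if pvB_isPref line then
      let p := PySem.Str.slice line none (some 2)
      (p, PySem.Str.strip (PySem.Str.slice line (some 5) none)) :: pvB_label (some p) rest
    else
      match sec with
      | none => pvB_label none rest
      | some s => (s, PySem.Str.strip line) :: pvB_label sec rest

-- phase 2: itertools.groupby on the section label (consecutive runs)
def pvB_groupGo : String → List String → List (String × String) → List (String × List String)
  | sec, acc, [] => [(sec, acc)]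
  | sec, acc, (s, t) :: rest =>
    if s = sec then pvB_groupGo sec (acc ++ [t]) rest
    else (sec, acc) :: pvB_groupGo s [t] rest

def pvB_group : List (String × String) → List (String × List String)
  | [] => []
  | (s, t) :: rest => pvB_groupGo s [t] rest

-- 'tokens[-1] = tokens[-1] + " " + text'
def pvB_merge : List String → String → List String
  | [], t => [t]
  | [x], t => [x ++ " " ++ t]
  | x :: xs, t => x :: pvB_merge xs t

-- one text of a group folded into its token list
def pvB_addTok (sec : String) (toks : List String) (t : String) : List String :=
  if t = "" then toks
  else if sec = "FT" ∧ PySem.Str.startswith t "/" = true ∧ toks ≠ [] then pvB_merge toks t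
  else toks ++ [t]

def preprocess_uniprot_content_alt (content : String) : String :=
  let lines := (PySem.Str.split? content "\n").getD []
  let groups := pvB_group (pvB_label none lines)
  let out := groups.foldl
    (fun out g =>
      let toks := g.2.foldl (pvB_addTok g.1) []
      if toks = [] then out else out ++ [PySem.Str.join " " toks]) []
  PySem.Str.join "\n" out

-- ===== PRECONDITION & SPEC =====
def Spec_preprocess_uniprot_content (content : String) (out : String) : Prop := out = preprocess_uniprot_content_alt content
instance (content : String) (out : String) : Decidable (Spec_preprocess_uniprot_content content out) := by unfold Spec_preprocess_uniprot_content; infer_instance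

-- ===== CLAIM (what is proved, stated in full; the proofs are below) =====
def Claim_equal_preprocess_uniprot_content : Prop := ∀ (content : String), Dom_preprocess_uniprot_content content → Spec_preprocess_uniprot_content content (preprocess_uniprot_content content)

-- ===== LEMMAS AND PROOFS =====

-- the fused reference computation the two ports are bridged through:
-- remaining output lines given the open section/token state and the remaining raw lines
def pvCont : Option String → List String → List String → List String
  | _, toks, [] => if toks = [] then [] else [PySem.Str.join " " toks]
  | sec, toks, line :: rest =>
    if PySem.Str.strip line = "" then pvCont sec toks rest
    else if pvB_isPref line then
      let p := PySem.Str.slice line none (some 2)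
      let t := PySem.Str.strip (PySem.Str.slice line (some 5) none)
      match sec with
      | some s =>
        if s ≠ p then
          (if toks = [] then [] else [PySem.Str.join " " toks]) ++ pvCont (some p) (pvB_addTok p [] t) rest
        else pvCont (some p) (pvB_addTok p toks t) rest
      | none => pvCont (some p) (pvB_addTok p toks t) rest
    else
      match sec with
      | none => pvCont none toks rest
      | some s => pvCont sec (pvB_addTok s toks (PySem.Str.strip line)) rest

theorem pvMerge_eq (ts : List String) (t : String) : pvA_merge ts t = pvB_merge ts t := by
  induction ts with
  | nil => rfl
  | cons x xs ih =>
    cases xs with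
    | nil => rfl
    | cons y ys => simp only [pvA_merge, pvB_merge] at ih ⊢; rw [ih]

theorem pvIsPref_eq (line : String) : pvA_isPref line = pvB_isPref line := rfl

-- A's guarded 'rest' equals the plain slice: past-the-end slicing yields ""
theorem pvRest_eq (line : String) :
    (if 5 < PySem.Str.len line then PySem.Str.slice line (some 5) none else "")
      = PySem.Str.slice line (some 5) none := by
  split
  · rfl
  · rename_i h
    refine (String.ext ?_).symm
    rw [PySem.Str.toList_slice, PySem.Chars.slice_eq_listSlice,
      PySem.List.slice_from _ (by decide : (0:Int) ≤ 5)]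
    simp only [String.toList_empty]
    rw [List.drop_eq_nil_iff]
    have := PySem.Str.len_eq line
    omega

-- A's prefixed-line token update equals pvB_addTok on the stripped rest
theorem pvTok_eq (pfx : String) (ct : List String) (r : String) :
    (if PySem.Str.strip r ≠ "" then
      if pfx = "FT" then
        (if PySem.Str.startswith (PySem.Str.strip r) "/" = false then ct ++ [PySem.Str.strip r]
         else pvA_merge ct (PySem.Str.strip r))
      else ct ++ [PySem.Str.strip r]
    else ct) = pvB_addTok pfx ct (PySem.Str.strip r) := by
  unfold pvB_addTok
  by_cases h0 : PySem.Str.strip r = ""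
  · simp [h0]
  · rw [if_neg h0, if_pos h0]
    by_cases hft : pfx = "FT"
    · cases hb : PySem.Str.startswith (PySem.Str.strip r) "/" with
      | false => rw [if_pos hft, if_pos rfl, if_neg (by simp)]
      | true =>
        rw [if_pos hft, if_neg (by simp)]
        cases ct with
        | nil => rw [if_neg (by simp)]; rfl
        | cons a l => rw [if_pos ⟨hft, rfl, by simp⟩, pvMerge_eq]
    · rw [if_neg hft, if_neg (by intro hc; exact hft hc.1)]

-- A's continuation-line token update equals pvB_addTok (the stripped line is nonempty)
theorem pvTokCont_eq (s : String) (ct : List String) (c : String) (hc : ¬ c = "") :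
    (if c ≠ "" then
      (if s = "FT" ∧ PySem.Str.startswith c "/" = true then pvA_merge ct c else ct ++ [c])
    else ct) = pvB_addTok s ct c := by
  unfold pvB_addTok
  rw [if_pos hc, if_neg hc]
  by_cases hm : s = "FT" ∧ PySem.Str.startswith c "/" = true
  · rw [if_pos hm]
    cases ct with
    | nil => rw [if_neg (by simp)]; rfl
    | cons a l => rw [if_pos ⟨hm.1, hm.2, by simp⟩, pvMerge_eq]
  · rw [if_neg hm, if_neg (by intro hc'; exact hm ⟨hc'.1, hc'.2.1⟩)]

-- step lemmas for pvA_step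
theorem pvA_step_blank (pl : List String) (cs : Option String) (ct : List String)
    (line : String) (h1 : PySem.Str.strip line = "") :
    pvA_step (pl, cs, ct) line = (pl, cs, ct) := by
  simp only [pvA_step, if_pos h1]

theorem pvA_step_pref_none (pl : List String) (ct : List String) (line : String)
    (h1 : ¬ PySem.Str.strip line = "") (h2 : pvA_isPref line = true) :
    pvA_step (pl, none, ct) line =
      (pl, some (PySem.Str.slice line none (some 2)),
       pvB_addTok (PySem.Str.slice line none (some 2)) ct
         (PySem.Str.strip (PySem.Str.slice line (some 5) none))) := by
  simp only [pvA_step, if_neg h1, if_pos h2, pvRest_eq, ← pvTok_eq]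
  repeat split
  all_goals first | rfl | simp_all

theorem pvA_step_pref_same (pl : List String) (s : String) (ct : List String) (line : String)
    (h1 : ¬ PySem.Str.strip line = "") (h2 : pvA_isPref line = true)
    (hsw : s = PySem.Str.slice line none (some 2)) :
    pvA_step (pl, some s, ct) line =
      (pl, some (PySem.Str.slice line none (some 2)),
       pvB_addTok (PySem.Str.slice line none (some 2)) ct
         (PySem.Str.strip (PySem.Str.slice line (some 5) none))) := by
  simp only [pvA_step, if_neg h1, if_pos h2, ne_eq, hsw, pvRest_eq, ← pvTok_eq]
  repeat split
  all_goals first | rfl | simp_all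

theorem pvA_step_pref_switch (pl : List String) (s : String) (ct : List String) (line : String)
    (h1 : ¬ PySem.Str.strip line = "") (h2 : pvA_isPref line = true)
    (hsw : ¬ s = PySem.Str.slice line none (some 2)) :
    pvA_step (pl, some s, ct) line =
      ((if ct ≠ [] then pl ++ [PySem.Str.join " " ct] else pl),
       some (PySem.Str.slice line none (some 2)),
       pvB_addTok (PySem.Str.slice line none (some 2)) []
         (PySem.Str.strip (PySem.Str.slice line (some 5) none))) := by
  simp only [pvA_step, if_neg h1, if_pos h2, ne_eq, if_pos hsw, pvRest_eq, ← pvTok_eq]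
  repeat split
  all_goals first | rfl | simp_all

theorem pvA_step_cont_none (pl : List String) (ct : List String) (line : String)
    (h1 : ¬ PySem.Str.strip line = "") (h2 : ¬ pvA_isPref line = true) :
    pvA_step (pl, none, ct) line = (pl, none, ct) := by
  simp only [pvA_step, if_neg h1, if_neg h2]

theorem pvA_step_cont (pl : List String) (s : String) (ct : List String) (line : String)
    (h1 : ¬ PySem.Str.strip line = "") (h2 : ¬ pvA_isPref line = true) :
    pvA_step (pl, some s, ct) line = (pl, some s, pvB_addTok s ct (PySem.Str.strip line)) := by
  simp only [pvA_step, if_neg h1, if_neg h2, ← pvTokCont_eq s ct (PySem.Str.strip line) h1]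
  repeat split
  all_goals first | rfl | simp_all

-- unfolding lemmas for pvCont
theorem pvCont_nil (sec : Option String) (toks : List String) :
    pvCont sec toks [] = if toks = [] then [] else [PySem.Str.join " " toks] := rfl

theorem pvCont_blank (sec : Option String) (toks : List String) (line : String)
    (rest : List String) (h1 : PySem.Str.strip line = "") :
    pvCont sec toks (line :: rest) = pvCont sec toks rest := by
  simp only [pvCont, if_pos h1]

theorem pvCont_pref_none (toks : List String) (line : String) (rest : List String)
    (h1 : ¬ PySem.Str.strip line = "") (h2 : pvB_isPref line = true) :
    pvCont none toks (line :: rest) =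
      pvCont (some (PySem.Str.slice line none (some 2)))
        (pvB_addTok (PySem.Str.slice line none (some 2)) toks
          (PySem.Str.strip (PySem.Str.slice line (some 5) none))) rest := by
  simp only [pvCont, if_neg h1, if_pos h2]

theorem pvCont_pref_same (s : String) (toks : List String) (line : String) (rest : List String)
    (h1 : ¬ PySem.Str.strip line = "") (h2 : pvB_isPref line = true)
    (hsw : s = PySem.Str.slice line none (some 2)) :
    pvCont (some s) toks (line :: rest) =
      pvCont (some (PySem.Str.slice line none (some 2)))
        (pvB_addTok (PySem.Str.slice line none (some 2)) toks
          (PySem.Str.strip (PySem.Str.slice line (some 5) none))) rest := by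
  rw [show pvCont (some s) toks (line :: rest) =
      (if PySem.Str.strip line = "" then pvCont (some s) toks rest
       else if pvB_isPref line then
        (if s ≠ PySem.Str.slice line none (some 2) then
          (if toks = [] then [] else [PySem.Str.join " " toks]) ++
            pvCont (some (PySem.Str.slice line none (some 2)))
              (pvB_addTok (PySem.Str.slice line none (some 2)) []
                (PySem.Str.strip (PySem.Str.slice line (some 5) none))) rest
         else
          pvCont (some (PySem.Str.slice line none (some 2)))
            (pvB_addTok (PySem.Str.slice line none (some 2)) toks
              (PySem.Str.strip (PySem.Str.slice line (some 5) none))) rest)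
       else pvCont (some s) (pvB_addTok s toks (PySem.Str.strip line)) rest) from rfl,
    if_neg h1, if_pos h2, if_neg (show ¬ s ≠ PySem.Str.slice line none (some 2) from fun h => h hsw)]

theorem pvCont_pref_switch (s : String) (toks : List String) (line : String) (rest : List String)
    (h1 : ¬ PySem.Str.strip line = "") (h2 : pvB_isPref line = true)
    (hsw : ¬ s = PySem.Str.slice line none (some 2)) :
    pvCont (some s) toks (line :: rest) =
      (if toks = [] then [] else [PySem.Str.join " " toks]) ++
        pvCont (some (PySem.Str.slice line none (some 2)))
          (pvB_addTok (PySem.Str.slice line none (some 2)) []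
            (PySem.Str.strip (PySem.Str.slice line (some 5) none))) rest := by
  rw [show pvCont (some s) toks (line :: rest) =
      (if PySem.Str.strip line = "" then pvCont (some s) toks rest
       else if pvB_isPref line then
        (if s ≠ PySem.Str.slice line none (some 2) then
          (if toks = [] then [] else [PySem.Str.join " " toks]) ++
            pvCont (some (PySem.Str.slice line none (some 2)))
              (pvB_addTok (PySem.Str.slice line none (some 2)) []
                (PySem.Str.strip (PySem.Str.slice line (some 5) none))) rest
         else
          pvCont (some (PySem.Str.slice line none (some 2)))
            (pvB_addTok (PySem.Str.slice line none (some 2)) toks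
              (PySem.Str.strip (PySem.Str.slice line (some 5) none))) rest)
       else pvCont (some s) (pvB_addTok s toks (PySem.Str.strip line)) rest) from rfl,
    if_neg h1, if_pos h2, if_pos hsw]

theorem pvCont_cont_none (toks : List String) (line : String) (rest : List String)
    (h1 : ¬ PySem.Str.strip line = "") (h2 : ¬ pvB_isPref line = true) :
    pvCont none toks (line :: rest) = pvCont none toks rest := by
  simp only [pvCont, if_neg h1, if_neg h2]

theorem pvCont_cont (s : String) (toks : List String) (line : String) (rest : List String)
    (h1 : ¬ PySem.Str.strip line = "") (h2 : ¬ pvB_isPref line = true) :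
    pvCont (some s) toks (line :: rest) =
      pvCont (some s) (pvB_addTok s toks (PySem.Str.strip line)) rest := by
  simp only [pvCont, if_neg h1, if_neg h2]

-- A's loop plus final flush, bridged to pvCont
theorem pvA_loop_eq (lines : List String) :
    ∀ (pl : List String) (cs : Option String) (ct : List String),
      (if (lines.foldl pvA_step (pl, cs, ct)).2.2 ≠ [] then
        (lines.foldl pvA_step (pl, cs, ct)).1 ++
          [PySem.Str.join " " (lines.foldl pvA_step (pl, cs, ct)).2.2]
      else (lines.foldl pvA_step (pl, cs, ct)).1)
        = pl ++ pvCont cs ct lines := by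
  induction lines with
  | nil =>
    intro pl cs ct
    simp only [List.foldl_nil, pvCont_nil, ne_eq, ite_not]
    by_cases h : ct = [] <;> simp [h]
  | cons line rest ih =>
    intro pl cs ct
    simp only [List.foldl_cons]
    by_cases h1 : PySem.Str.strip line = ""
    · rw [pvA_step_blank _ _ _ _ h1, ih, pvCont_blank _ _ _ _ h1]
    · by_cases h2 : pvA_isPref line = true
      · have h2' : pvB_isPref line = true := by rw [← pvIsPref_eq]; exact h2
        cases cs with
        | none =>
          rw [pvA_step_pref_none _ _ _ h1 h2, ih, pvCont_pref_none _ _ _ h1 h2']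
        | some s =>
          by_cases hsw : s = PySem.Str.slice line none (some 2)
          · rw [pvA_step_pref_same _ _ _ _ h1 h2 hsw, ih, pvCont_pref_same _ _ _ _ h1 h2' hsw]
          · rw [pvA_step_pref_switch _ _ _ _ h1 h2 hsw, ih,
              pvCont_pref_switch _ _ _ _ h1 h2' hsw]
            by_cases hct : ct = [] <;> simp [hct]
      · have h2' : ¬ pvB_isPref line = true := by rw [← pvIsPref_eq]; exact h2
        cases cs with
        | none =>
          rw [pvA_step_cont_none _ _ _ h1 h2, ih, pvCont_cont_none _ _ _ h1 h2']
        | some s =>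
          rw [pvA_step_cont _ _ _ _ h1 h2, ih, pvCont_cont _ _ _ _ h1 h2']

-- B's render fold is a flatMap
def pvEmit (g : String × List String) : List String :=
  let toks := g.2.foldl (pvB_addTok g.1) []
  if toks = [] then [] else [PySem.Str.join " " toks]

theorem pvRender_eq (gs : List (String × List String)) (acc : List String) :
    gs.foldl (fun out g =>
        let toks := g.2.foldl (pvB_addTok g.1) []
        if toks = [] then out else out ++ [PySem.Str.join " " toks]) acc
      = acc ++ gs.flatMap pvEmit := by
  induction gs generalizing acc with
  | nil => simp
  | cons g gs ih =>
    simp only [List.foldl_cons, List.flatMap_cons, ih, pvEmit]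
    by_cases h : g.2.foldl (pvB_addTok g.1) [] = [] <;> simp [h]

-- unfolding lemmas for pvB_label
theorem pvB_label_blank (sec : Option String) (line : String) (rest : List String)
    (h1 : PySem.Str.strip line = "") :
    pvB_label sec (line :: rest) = pvB_label sec rest := by
  simp only [pvB_label, if_pos h1]

theorem pvB_label_pref (sec : Option String) (line : String) (rest : List String)
    (h1 : ¬ PySem.Str.strip line = "") (h2 : pvB_isPref line = true) :
    pvB_label sec (line :: rest) =
      (PySem.Str.slice line none (some 2),
       PySem.Str.strip (PySem.Str.slice line (some 5) none)) ::
        pvB_label (some (PySem.Str.slice line none (some 2))) rest := by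
  simp only [pvB_label, if_neg h1, if_pos h2]

theorem pvB_label_cont_none (line : String) (rest : List String)
    (h1 : ¬ PySem.Str.strip line = "") (h2 : ¬ pvB_isPref line = true) :
    pvB_label none (line :: rest) = pvB_label none rest := by
  simp only [pvB_label, if_neg h1, if_neg h2]

theorem pvB_label_cont (s : String) (line : String) (rest : List String)
    (h1 : ¬ PySem.Str.strip line = "") (h2 : ¬ pvB_isPref line = true) :
    pvB_label (some s) (line :: rest) =
      (s, PySem.Str.strip line) :: pvB_label (some s) rest := by
  simp only [pvB_label, if_neg h1, if_neg h2]

-- B's grouped pipeline, bridged to pvCont (open group (sec, texts))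
theorem pvB_core (lines : List String) :
    ∀ (sec : String) (texts : List String),
      (pvB_groupGo sec texts (pvB_label (some sec) lines)).flatMap pvEmit
        = pvCont (some sec) (texts.foldl (pvB_addTok sec) []) lines := by
  induction lines with
  | nil =>
    intro sec texts
    simp [pvB_label, pvB_groupGo, pvCont_nil, pvEmit]
  | cons line rest ih =>
    intro sec texts
    by_cases h1 : PySem.Str.strip line = ""
    · rw [pvB_label_blank _ _ _ h1, ih, pvCont_blank _ _ _ _ h1]
    · by_cases h2 : pvB_isPref line = true
      · by_cases hsw : PySem.Str.slice line none (some 2) = sec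
        · rw [pvB_label_pref _ _ _ h1 h2]
          simp only [pvB_groupGo, if_pos hsw]
          rw [pvCont_pref_same _ _ _ _ h1 h2 hsw.symm, hsw, ih, List.foldl_append]
          simp only [List.foldl_cons, List.foldl_nil]
        · rw [pvB_label_pref _ _ _ h1 h2]
          simp only [pvB_groupGo, if_neg hsw]
          rw [List.flatMap_cons, ih,
            pvCont_pref_switch _ _ _ _ h1 h2 (fun h => hsw h.symm)]
          simp only [List.foldl_cons, List.foldl_nil, pvEmit]
      · rw [pvB_label_cont _ _ _ h1 h2]
        simp only [pvB_groupGo, if_true]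
        rw [ih, List.foldl_append, pvCont_cont _ _ _ _ h1 h2]
        simp only [List.foldl_cons, List.foldl_nil]

theorem pvB_start (lines : List String) :
    (pvB_group (pvB_label none lines)).flatMap pvEmit = pvCont none [] lines := by
  induction lines with
  | nil => simp [pvB_label, pvB_group, pvCont_nil]
  | cons line rest ih =>
    by_cases h1 : PySem.Str.strip line = ""
    · rw [pvB_label_blank _ _ _ h1, ih, pvCont_blank _ _ _ _ h1]
    · by_cases h2 : pvB_isPref line = true
      · rw [pvB_label_pref _ _ _ h1 h2]
        simp only [pvB_group]
        rw [pvB_core, pvCont_pref_none _ _ _ h1 h2]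
        simp only [List.foldl_cons, List.foldl_nil]
      · rw [pvB_label_cont_none _ _ h1 h2, ih, pvCont_cont_none _ _ _ h1 h2]

-- ===== VERDICT (by name: the statement is the Claim_ definition above) =====
theorem preprocess_uniprot_content_spec : Claim_equal_preprocess_uniprot_content := by
  intro content _
  unfold Spec_preprocess_uniprot_content preprocess_uniprot_content preprocess_uniprot_content_alt
  simp only [pvRender_eq, pvB_start, pvA_loop_eq]
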